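-- pv_equiv track=rewrite | github.com/reyhancetinn/SMART-ATHLETE-CARD-LEAGUE-SIMULATION | smart_league/card_art.py | _visible_stat_items
-- ===== SOURCE A (Python) =====
-- def _visible_stat_items(stats: dict[str, int] | None) -> list[tuple[str, int]]:
--     items = list((stats or {}).items())
--     preferred_order = [
--         "penalti",
--         "serbest_vurus",
--         "kaleci_karsi_karsiya",
--         "ucluk",
--         "ikilik",
--         "serbest_atis",
--         "servis",
--         "blok",
--         "smac",
--         "dayaniklilik",
--     ]
--     ordered: list[tuple[str, int]] = []
--     for name in preferred_order:
--         for item in items: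
--             if item[0] == name and item not in ordered:
--                 ordered.append(item)
--     for item in items:
--         if item not in ordered and item[0] != "ozel_yetenek_katsayisi":
--             ordered.append(item)
--     visible = ordered[:4]
--     while len(visible) < 4:
--         visible.append((f"stat_{len(visible)}", 0))
--     return visible
-- ===== SOURCE B (Python) =====
-- def _visible_stat_items(stats):
--     preferred_order = [
--         "penalti",
--         "serbest_vurus",
--         "kaleci_karsi_karsiya",
--         "ucluk",
--         "ikilik",
--         "serbest_atis",
--         "servis",
--         "blok",
--         "smac",
--         "dayaniklilik",
--     ]
--     pref = []
--     rest = []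
--     for item in (stats or {}).items():
--         if item[0] in preferred_order:
--             pref.append(item)
--         elif item[0] != "ozel_yetenek_katsayisi":
--             rest.append(item)
--     pref.sort(key=lambda it: preferred_order.index(it[0]))
--     visible = (pref + rest)[:4]
--     while len(visible) < 4:
--         visible.append((f"stat_{len(visible)}", 0))
--     return visible
-- ===== Notes on version B (the rewrite author's own statement) =====
-- stated objective: faster
-- what changed: One pass partitions the items into preferred/rest (dropping 'ozel_yetenek_katsayisi') and a stable sort by preferred-index orders the at-most-10 preferred items, replacing A's ten full scans plus the quadratic 'item not in ordered' membership rechecks.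
import Mathlib
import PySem

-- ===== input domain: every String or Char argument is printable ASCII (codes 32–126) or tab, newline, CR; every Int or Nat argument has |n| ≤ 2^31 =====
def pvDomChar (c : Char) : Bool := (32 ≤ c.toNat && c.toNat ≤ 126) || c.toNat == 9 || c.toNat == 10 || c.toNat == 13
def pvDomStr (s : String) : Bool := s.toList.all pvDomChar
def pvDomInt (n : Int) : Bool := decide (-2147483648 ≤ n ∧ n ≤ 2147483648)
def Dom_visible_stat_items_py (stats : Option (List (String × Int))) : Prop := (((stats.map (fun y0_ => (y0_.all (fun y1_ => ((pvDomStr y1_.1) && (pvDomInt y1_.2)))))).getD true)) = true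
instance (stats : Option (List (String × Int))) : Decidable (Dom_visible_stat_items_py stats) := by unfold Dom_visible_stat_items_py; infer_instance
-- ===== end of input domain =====

-- B replaces A's ten scans + quadratic 'item not in ordered' rechecks by one partition pass
-- and a stable sort of the ≤10 preferred items (objective: faster).

-- the preferred_order literal both Pythons contain verbatim
def preferredOrder : List String :=
  ["penalti", "serbest_vurus", "kaleci_karsi_karsiya", "ucluk", "ikilik",
   "serbest_atis", "servis", "blok", "smac", "dayaniklilik"]

-- the identical trailing 'while len(visible) < 4: visible.append((f"stat_{len(visible)}", 0))' both Pythons contain verbatim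
-- fuel = 4 iterations suffice: each pass appends one element and the loop stops at length 4
def padLoop : Nat → List (String × Int) → List (String × Int)
  | 0, visible => visible
  | fuel + 1, visible =>
      if visible.length < 4 then
        padLoop fuel (visible ++ [("stat_" ++ PySem.Int.toStr (visible.length : Int), 0)])
      else visible

def pyPadTo4 (visible : List (String × Int)) : List (String × Int) :=
  padLoop 4 visible

-- ===== PORT A =====
def visible_stat_items_py (stats : Option (List (String × Int))) : List (String × Int) :=
  let items := stats.getD []
  let ordered : List (String × Int) :=
    preferredOrder.foldl (fun ordered name =>
      items.foldl (fun ordered item =>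
        if item.1 == name && !ordered.contains item then ordered ++ [item] else ordered)
        ordered) []
  let ordered :=
    items.foldl (fun ordered item =>
      if !ordered.contains item && item.1 != "ozel_yetenek_katsayisi" then ordered ++ [item]
      else ordered) ordered
  pyPadTo4 (ordered.take 4)

-- ===== PORT B =====
-- key lambda 'preferred_order.index(it[0])': .index is applied only to keys present in
-- preferred_order (every element of pref), so the .getD 0 default is never used
def prefKey (it : String × Int) : Int :=
  (((PySem.List.index? preferredOrder it.1).getD 0 : Nat) : Int)

def visible_stat_items_py_alt (stats : Option (List (String × Int))) : List (String × Int) :=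
  let pr : List (String × Int) × List (String × Int) :=
    (stats.getD []).foldl (fun acc item =>
      if preferredOrder.contains item.1 then (acc.1 ++ [item], acc.2)
      else if item.1 != "ozel_yetenek_katsayisi" then (acc.1, acc.2 ++ [item])
      else acc) ([], [])
  let pref := PySem.List.sorted pr.1 prefKey false
  pyPadTo4 ((pref ++ pr.2).take 4)

-- ===== PRECONDITION & SPEC =====
-- Pre_ excludes association lists with duplicate keys: those represent no Python dict
-- (A's parameter is dict[str, int] | None), so nothing A returns on is excluded.
def Pre_visible_stat_items_py (stats : Option (List (String × Int))) : Prop :=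
  ((stats.getD []).map Prod.fst).Nodup
instance (stats : Option (List (String × Int))) : Decidable (Pre_visible_stat_items_py stats) := by
  unfold Pre_visible_stat_items_py; infer_instance

def pvWitness_visible_stat_items_py : (Option (List (String × Int))) :=
  some [("penalti", 5), ("hiz", 1)]

def Spec_visible_stat_items_py (stats : Option (List (String × Int))) (out : List (String × Int)) : Prop := out = visible_stat_items_py_alt stats
instance (stats : Option (List (String × Int))) (out : List (String × Int)) : Decidable (Spec_visible_stat_items_py stats out) := by unfold Spec_visible_stat_items_py; infer_instance

-- ===== CLAIM (what is proved, stated in full; the proofs are below) =====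
def Claim_equal_visible_stat_items_py : Prop := ∀ (stats : Option (List (String × Int))), Dom_visible_stat_items_py stats → Pre_visible_stat_items_py stats → Spec_visible_stat_items_py stats (visible_stat_items_py stats)

-- ===== LEMMAS AND PROOFS =====

-- A's inner pass for one preferred name appends exactly the (unique) item with that key
lemma innerA (name : String) (items acc : List (String × Int))
    (hk : (items.map Prod.fst).Nodup)
    (h : ∀ it ∈ items, it.1 = name → it ∉ acc) :
    items.foldl (fun o it => if it.1 == name && !o.contains it then o ++ [it] else o) acc
      = acc ++ items.filter (fun it => it.1 == name) := by
  induction items generalizing acc with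
  | nil => simp
  | cons it tl ih =>
    simp only [List.map_cons, List.nodup_cons] at hk
    simp only [List.foldl_cons]
    by_cases hn : it.1 = name
    · have hnotin : it ∉ acc := h it (by simp) hn
      have hcond : (it.1 == name && !acc.contains it) = true := by
        simp [hn, hnotin]
      rw [if_pos hcond]
      rw [ih (acc ++ [it]) hk.2 ?_]
      · simp [List.filter_cons, hn]
      · intro x hx hxn
        simp only [List.mem_append, List.mem_singleton, not_or]
        refine ⟨h x (by simp [hx]) hxn, ?_⟩
        intro hxe
        apply hk.1
        have hmem : x.1 ∈ List.map Prod.fst tl := List.mem_map_of_mem hx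
        rw [hxn, ← hn] at hmem
        exact hmem
    · have hcond : ¬ ((it.1 == name && !acc.contains it) = true) := by simp [hn]
      rw [if_neg hcond]
      rw [ih acc hk.2 (fun x hx hxn => h x (by simp [hx]) hxn)]
      simp [List.filter_cons, hn]

-- A's outer loop over the preferred names builds the bucket concatenation
lemma outerA (names : List String) (items acc : List (String × Int))
    (hn : names.Nodup) (hk : (items.map Prod.fst).Nodup)
    (h : ∀ it ∈ items, it.1 ∈ names → it ∉ acc) :
    names.foldl (fun o name =>
        items.foldl (fun o it => if it.1 == name && !o.contains it then o ++ [it] else o) o) acc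
      = acc ++ names.flatMap (fun n => items.filter (fun it => it.1 == n)) := by
  induction names generalizing acc with
  | nil => simp
  | cons n ns ih =>
    simp only [List.nodup_cons] at hn
    simp only [List.foldl_cons]
    rw [innerA n items acc hk (fun x hx hxn => h x hx (by simp [hxn]))]
    rw [ih (acc ++ items.filter (fun it => it.1 == n)) hn.2 ?_]
    · simp [List.flatMap_cons, List.append_assoc]
    · intro x hx hxn
      simp only [List.mem_append, not_or]
      refine ⟨h x hx (by simp [hxn]), ?_⟩
      intro hxf
      have := (List.mem_filter.mp hxf).2
      simp only [beq_iff_eq] at this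
      exact hn.1 (this ▸ hxn)

-- A's second loop appends the items absent from the already-built prefix, key ≠ excluded
lemma secondA (items acc : List (String × Int)) (hnd : items.Nodup) :
    items.foldl (fun o it =>
        if !o.contains it && it.1 != "ozel_yetenek_katsayisi" then o ++ [it] else o) acc
      = acc ++ items.filter (fun it => !acc.contains it && it.1 != "ozel_yetenek_katsayisi") := by
  induction items generalizing acc with
  | nil => simp
  | cons it tl ih =>
    simp only [List.nodup_cons] at hnd
    simp only [List.foldl_cons]
    by_cases hc : (!acc.contains it && it.1 != "ozel_yetenek_katsayisi") = true
    · rw [if_pos hc]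
      rw [ih (acc ++ [it]) hnd.2]
      have heq : tl.filter (fun x => !(acc ++ [it]).contains x && x.1 != "ozel_yetenek_katsayisi")
          = tl.filter (fun x => !acc.contains x && x.1 != "ozel_yetenek_katsayisi") := by
        apply List.filter_congr
        intro x hx
        have hne : x ≠ it := fun he => hnd.1 (he ▸ hx)
        simp [List.contains_eq_mem, hne]
      rw [heq, List.filter_cons, if_pos hc]
      simp
    · rw [if_neg hc]
      rw [ih acc hnd.2, List.filter_cons, if_neg hc]

-- membership in the bucket concatenation
lemma mem_flat (names : List String) (items : List (String × Int)) (it : String × Int) :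
    it ∈ names.flatMap (fun n => items.filter (fun x => x.1 == n)) ↔ it ∈ items ∧ it.1 ∈ names := by
  simp only [List.mem_flatMap, List.mem_filter, beq_iff_eq]
  constructor
  · rintro ⟨n, hn, hit, he⟩; exact ⟨hit, he ▸ hn⟩
  · rintro ⟨hit, hn⟩; exact ⟨it.1, hn, hit, rfl⟩

-- a filter by a disjunction of disjoint predicates splits into a permutation of two filters
lemma filter_or_perm {α : Type} (p q : α → Bool) (l : List α)
    (h : ∀ x ∈ l, ¬(p x = true ∧ q x = true)) :
    (l.filter (fun x => p x || q x)).Perm (l.filter p ++ l.filter q) := by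
  induction l with
  | nil => simp
  | cons x tl ih =>
    have ih' := ih (fun y hy => h y (by simp [hy]))
    cases hp : p x with
    | true =>
      have hq : q x = false := by
        cases hq : q x with
        | true => exact absurd ⟨hp, hq⟩ (h x (by simp))
        | false => rfl
      simpa [List.filter_cons, hp, hq] using ih'.cons x
    | false =>
      cases hq : q x with
      | true =>
        simp only [List.filter_cons, hp, hq, Bool.false_or, if_true]
        exact (ih'.cons x).trans (List.perm_middle.symm)
      | false =>
        simpa [List.filter_cons, hp, hq] using ih'

-- the bucket concatenation is a permutation of the one-pass preferred filter
lemma flat_perm (names : List String) (items : List (String × Int)) (hn : names.Nodup) :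
    (names.flatMap (fun n => items.filter (fun x => x.1 == n))).Perm
      (items.filter (fun it => names.contains it.1)) := by
  induction names with
  | nil => simp
  | cons n ns ih =>
    simp only [List.nodup_cons] at hn
    have hthis : items.filter (fun it => (n :: ns).contains it.1)
        = items.filter (fun it => (it.1 == n) || ns.contains it.1) := by
      apply List.filter_congr
      intro x _
      by_cases h1 : x.1 = n <;> by_cases h2 : x.1 ∈ ns <;>
        simp [List.contains_eq_mem, h1, h2]
    rw [List.flatMap_cons, hthis]
    have hdisj : ∀ x ∈ items,
        ¬(((fun it : String × Int => it.1 == n) x = true) ∧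
          ((fun it : String × Int => ns.contains it.1) x = true)) := by
      rintro x _ ⟨h1, h2⟩
      simp only [beq_iff_eq] at h1
      simp only [List.contains_eq_mem, decide_eq_true_eq] at h2
      exact hn.1 (h1 ▸ h2)
    exact ((ih hn.2).append_left (items.filter (fun x => x.1 == n))).trans
      (filter_or_perm (fun it : String × Int => it.1 == n)
        (fun it : String × Int => ns.contains it.1) items hdisj).symm

-- with keys nodup, the bucket concatenation is strictly increasing in any name-rank
lemma flatPair (r : String → Int) (names : List String) (items : List (String × Int))
    (hk : (items.map Prod.fst).Nodup) (h : names.Pairwise (fun a b => r a < r b)) :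
    (names.flatMap (fun n => items.filter (fun x => x.1 == n))).Pairwise
      (fun a b => r a.1 < r b.1) := by
  induction names with
  | nil => simp
  | cons n ns ih =>
    simp only [List.pairwise_cons] at h
    rw [List.flatMap_cons, List.pairwise_append]
    refine ⟨?_, ih h.2, ?_⟩
    · -- the bucket for one name has at most one element (keys nodup)
      rcases hfe : items.filter (fun x => x.1 == n) with _ | ⟨a, tl⟩
      · rw [hfe]; exact List.Pairwise.nil
      · rcases tl with _ | ⟨b, tl2⟩
        · rw [hfe]; simp
        · exfalso
          have hsub := List.filter_sublist (l := items) (p := fun x => x.1 == n)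
          rw [hfe] at hsub
          have hnd : (List.map Prod.fst (a :: b :: tl2)).Nodup :=
            (hsub.map Prod.fst).nodup hk
          have ha : a.1 = n := by
            have := List.of_mem_filter (a := a) (by rw [hfe]; simp)
            simpa using this
          have hb : b.1 = n := by
            have := List.of_mem_filter (a := b) (by rw [hfe]; simp)
            simpa using this
          simp [ha, hb] at hnd
    · intro a ha b hb
      have ha1 : a.1 = n := by simpa using (List.mem_filter.mp ha).2
      have hb1 : b.1 ∈ ns := ((mem_flat ns items b).mp hb).2
      exact ha1 ▸ h.1 b.1 hb1

-- B's partition pass computes the two filters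
lemma pairFold (items : List (String × Int)) (a b : List (String × Int)) :
    items.foldl (fun (acc : List (String × Int) × List (String × Int)) item =>
        if preferredOrder.contains item.1 then (acc.1 ++ [item], acc.2)
        else if item.1 != "ozel_yetenek_katsayisi" then (acc.1, acc.2 ++ [item])
        else acc) (a, b)
      = (a ++ items.filter (fun it => preferredOrder.contains it.1),
         b ++ items.filter (fun it =>
            !preferredOrder.contains it.1 && it.1 != "ozel_yetenek_katsayisi")) := by
  induction items generalizing a b with
  | nil => simp
  | cons it tl ih =>
    have hoz : ("ozel_yetenek_katsayisi" : String) ∉ preferredOrder := by decide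
    by_cases hp : it.1 ∈ preferredOrder
    · have ih2 := ih (a ++ [it]) b
      simp at ih2
      simpa [List.filter_cons, hp] using ih2
    · by_cases ho : it.1 = "ozel_yetenek_katsayisi"
      · have ih2 := ih a b
        simp at ih2
        simpa [List.filter_cons, hp, ho, hoz] using ih2
      · have ih2 := ih a (b ++ [it])
        simp at ih2
        simpa [List.filter_cons, hp, ho] using ih2

-- prefKey is strictly increasing along preferredOrder
lemma prefPairwise : preferredOrder.Pairwise
    (fun a b => (((PySem.List.index? preferredOrder a).getD 0 : Nat) : Int)
              < (((PySem.List.index? preferredOrder b).getD 0 : Nat) : Int)) := by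
  decide

-- ===== VERDICT (by name: the statement is the Claim_ definition above) =====
theorem visible_stat_items_py_spec : Claim_equal_visible_stat_items_py := by
  intro stats _ hpre
  unfold Spec_visible_stat_items_py
  simp only [visible_stat_items_py, visible_stat_items_py_alt]
  have hk : ((stats.getD []).map Prod.fst).Nodup := hpre
  have hnd : (stats.getD []).Nodup := hk.of_map
  have hnames : preferredOrder.Nodup := by decide
  rw [outerA preferredOrder (stats.getD []) [] hnames hk (by simp)]
  rw [List.nil_append]
  rw [secondA (stats.getD [])
    (preferredOrder.flatMap (fun n => (stats.getD []).filter (fun x => x.1 == n))) hnd]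
  rw [pairFold (stats.getD []) [] []]
  have hrest : (stats.getD []).filter (fun it =>
        !(preferredOrder.flatMap (fun n => (stats.getD []).filter (fun x => x.1 == n))).contains it
          && it.1 != "ozel_yetenek_katsayisi")
      = (stats.getD []).filter (fun it =>
          !preferredOrder.contains it.1 && it.1 != "ozel_yetenek_katsayisi") := by
    apply List.filter_congr
    intro x hx
    have hcm : (preferredOrder.flatMap
        (fun n => (stats.getD []).filter (fun x => x.1 == n))).contains x
        = preferredOrder.contains x.1 := by
      simp only [List.contains_eq_mem]
      rw [Bool.eq_iff_iff]
      simp only [decide_eq_true_eq, mem_flat]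
      tauto
    rw [hcm]
  rw [hrest]
  have hsort : PySem.List.sorted
      ((stats.getD []).filter (fun it => preferredOrder.contains it.1)) prefKey false
      = preferredOrder.flatMap (fun n => (stats.getD []).filter (fun x => x.1 == n)) := by
    apply PySem.List.sorted_eq_of_perm_of_pairwise_lt
    · exact flat_perm preferredOrder (stats.getD []) hnames
    · exact flatPair (fun s => (((PySem.List.index? preferredOrder s).getD 0 : Nat) : Int))
        preferredOrder (stats.getD []) hk prefPairwise
  simp only [List.nil_append]
  rw [hsort]
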